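-- pv_equiv track=rewrite | github.com/wellisonS/Desafio-EDS | q9.py | verificar_prescricao
-- ===== SOURCE A (Python) =====
-- def verificar_prescricao(prescricao, estoque):
--     estoque_dict = {}
--
--     # Criar um dicionário para contar a frequência de cada medicamento no estoque
--     for medicamento in estoque:
--         estoque_dict[medicamento] = estoque_dict.get(medicamento, 0) + 1
--
--     # Verificar se cada medicamento na prescrição está disponível no estoque
--     for medicamento in prescricao:
--         if medicamento not in estoque_dict or estoque_dict[medicamento] == 0:
--             return False
--         else:
--             estoque_dict[medicamento] -= 1
--     return True
-- ===== SOURCE B (Python) =====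
-- def verificar_prescricao(prescricao, estoque):
--     # Build both frequency tables, then compare them as multisets (sub-multiset test).
--     needed = {}
--     for m in prescricao:
--         needed[m] = needed.get(m, 0) + 1
--     available = {}
--     for m in estoque:
--         available[m] = available.get(m, 0) + 1
--     return all(qtd <= available.get(m, 0) for m, qtd in needed.items())
-- ===== Notes on version B (the rewrite author's own statement) =====
-- stated objective: idiomatic
-- what changed: Replaces A's consume-the-stock loop (decrement a single stock counter per prescription item, early-return on shortage) with a multiset-subset test: build frequency tables for both lists and check every required count is covered by the available count.
import Mathlib
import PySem

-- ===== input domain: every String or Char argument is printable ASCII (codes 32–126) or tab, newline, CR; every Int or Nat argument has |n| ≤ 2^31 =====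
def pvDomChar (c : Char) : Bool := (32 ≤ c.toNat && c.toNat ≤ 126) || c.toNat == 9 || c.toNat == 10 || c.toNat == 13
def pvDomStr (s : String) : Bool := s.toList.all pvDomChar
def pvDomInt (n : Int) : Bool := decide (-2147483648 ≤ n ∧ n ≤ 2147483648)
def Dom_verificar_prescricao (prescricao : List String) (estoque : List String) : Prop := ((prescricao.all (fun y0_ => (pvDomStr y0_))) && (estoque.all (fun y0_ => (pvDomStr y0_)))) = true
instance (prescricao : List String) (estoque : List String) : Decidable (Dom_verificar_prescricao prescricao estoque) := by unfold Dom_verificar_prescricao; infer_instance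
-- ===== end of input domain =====

-- B replaces A's consume-the-stock decrement loop by building both frequency tables and
-- comparing them as multisets (idiomatic; same asymptotic cost).


-- ===== PORT A =====
-- the second loop of A: consume the stock dict item by item, early False on shortage
def vpConsume (d : PySem.Dict String Int) : List String → Bool
  | [] => true
  | m :: rest =>
    if !d.contains m || d.getD m 0 == 0 then false
    else vpConsume (d.insert m (d.getD m 0 - 1)) rest

def verificar_prescricao (prescricao : List String) (estoque : List String) : Bool :=
  vpConsume (estoque.foldl (fun d m => d.insert m (d.getD m 0 + 1)) PySem.Dict.empty) prescricao

-- ===== PORT B =====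
def verificar_prescricao_alt (prescricao : List String) (estoque : List String) : Bool :=
  let needed : PySem.Dict String Int := prescricao.foldl (fun d m => d.insert m (d.getD m 0 + 1)) PySem.Dict.empty
  let available : PySem.Dict String Int := estoque.foldl (fun d m => d.insert m (d.getD m 0 + 1)) PySem.Dict.empty
  needed.items.all (fun q => decide (q.2 ≤ available.getD q.1 0))

-- ===== PRECONDITION & SPEC =====
def Spec_verificar_prescricao (prescricao : List String) (estoque : List String) (out : Bool) : Prop := out = verificar_prescricao_alt prescricao estoque
instance (prescricao : List String) (estoque : List String) (out : Bool) : Decidable (Spec_verificar_prescricao prescricao estoque out) := by unfold Spec_verificar_prescricao; infer_instance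

-- ===== CLAIM (what is proved, stated in full; the proofs are below) =====
def Claim_equal_verificar_prescricao : Prop := ∀ (prescricao : List String) (estoque : List String), Dom_verificar_prescricao prescricao estoque → Spec_verificar_prescricao prescricao estoque (verificar_prescricao prescricao estoque)

-- ===== LEMMAS AND PROOFS =====

-- A's guard '!(m in d) || d[m] == 0' reduces to 'd.getD m 0 = 0'
theorem vpConsume_guard (d : PySem.Dict String Int) (m : String) :
    (!d.contains m || d.getD m 0 == 0) = (d.getD m 0 == 0) := by
  by_cases h : d.contains m = true
  · simp [h]
  · have h0 : d.getD m 0 = 0 := PySem.Dict.getD_of_not_contains d 0 (by simpa using h)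
    simp [h0]

-- invariant of A's consuming loop over a nonnegative-valued dict
theorem vpConsume_iff (rest : List String) :
    ∀ d : PySem.Dict String Int, (∀ k, 0 ≤ d.getD k 0) →
      (vpConsume d rest = true ↔ ∀ m ∈ rest, (rest.count m : Int) ≤ d.getD m 0) := by
  induction rest with
  | nil => intro d _; simp [vpConsume]
  | cons m rest ih =>
    intro d hnn
    rw [vpConsume, vpConsume_guard]
    by_cases h0 : d.getD m 0 = 0
    · rw [if_pos (by simp [h0])]
      constructor
      · intro h; simp at h
      · intro h
        have := h m (by simp)
        rw [h0, List.count_cons_self] at this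
        push_cast at this
        omega
    · have hpos : 1 ≤ d.getD m 0 := by have := hnn m; omega
      rw [if_neg (by simp [h0])]
      rw [ih _ (by
        intro k
        rw [PySem.Dict.getD_insert]
        split_ifs with hk
        · omega
        · exact hnn k)]
      constructor
      · intro h x hx
        rcases List.mem_cons.mp hx with rfl | hxr
        · by_cases hmr : x ∈ rest
          · have := h x hmr
            rw [PySem.Dict.getD_insert, if_pos rfl] at this
            simp [List.count_cons_self]
            omega
          · simp [List.count_cons_self, List.count_eq_zero_of_not_mem hmr]
            omega
        · have := h x hxr
          rw [PySem.Dict.getD_insert] at this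
          split_ifs at this with hxm
          · subst hxm
            simp [List.count_cons_self]
            omega
          · simpa [List.count_cons_of_ne (by exact fun he => hxm he.symm)] using this
      · intro h x hx
        have := h x (List.mem_cons_of_mem m hx)
        rw [PySem.Dict.getD_insert]
        split_ifs with hxm
        · subst hxm
          simp [List.count_cons_self] at this
          omega
        · rwa [List.count_cons_of_ne (by exact fun he => hxm he.symm)] at this

theorem verificar_prescricao_iff (p e : List String) :
    verificar_prescricao p e = true ↔ ∀ m ∈ p, (p.count m : Int) ≤ (e.count m : Int) := by
  unfold verificar_prescricao
  rw [PySem.Dict.foldl_insert_getD_add_one_eq_counter]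
  rw [vpConsume_iff p (PySem.Dict.counter e) (by
    intro k; rw [PySem.Dict.getD_counter]; positivity)]
  simp [PySem.Dict.getD_counter]

theorem verificar_prescricao_alt_iff (p e : List String) :
    verificar_prescricao_alt p e = true ↔ ∀ m ∈ p, (p.count m : Int) ≤ (e.count m : Int) := by
  unfold verificar_prescricao_alt
  rw [PySem.Dict.foldl_insert_getD_add_one_eq_counter,
      PySem.Dict.foldl_insert_getD_add_one_eq_counter,
      List.all_eq_true]
  simp only [PySem.Dict.items_counter, List.mem_map, PySem.Dict.getD_counter]
  constructor
  · intro h m hm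
    have := h (m, (p.count m : Int)) ⟨m, by simp [PySem.Set.mem_ofList, hm]⟩
    simpa using this
  · rintro h q ⟨k, hk, rfl⟩
    have : k ∈ p := (PySem.Set.mem_ofList _ _).mp hk
    simpa using h k this

-- ===== VERDICT (by name: the statement is the Claim_ definition above) =====
theorem verificar_prescricao_spec : Claim_equal_verificar_prescricao := by
  intro p e _
  unfold Spec_verificar_prescricao
  rw [Bool.eq_iff_iff, verificar_prescricao_iff, verificar_prescricao_alt_iff]
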